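-- pv_equiv track=rewrite | github.com/tluth/speckdreieck | speckdreieck/speckdreieck.py | find_dominant_axis
-- ===== SOURCE A (Python) =====
-- def find_dominant_axis(vertices):
--     """
--     measures which axis has least variance and returns 0, 1, or 2 (x, y, z)
--     so the 3D coordinates can be reduced to 2D
--
--     """
--     xArray = [x[0] for x in vertices]
--     yArray = [x[1] for x in vertices]
--     zArray = [x[2] for x in vertices]
--
--     xVariance = max(xArray) - min(xArray)
--     yVariance = max(yArray) - min(yArray)
--     zVariance = max(zArray) - min(zArray)
--     allVars = [xVariance, yVariance, zVariance]
--     return allVars.index(min(allVars))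
-- ===== SOURCE B (Python) =====
-- def find_dominant_axis(vertices):
--     """Single pass: running min/max per axis, then pick smallest range (lowest index wins ties)."""
--     v0 = vertices[0]
--     min0, min1, min2 = v0[0], v0[1], v0[2]
--     max0, max1, max2 = min0, min1, min2
--     for v in vertices[1:]:
--         min0 = min(min0, v[0]); max0 = max(max0, v[0])
--         min1 = min(min1, v[1]); max1 = max(max1, v[1])
--         min2 = min(min2, v[2]); max2 = max(max2, v[2])
--     rx, ry, rz = max0 - min0, max1 - min1, max2 - min2
--     if ry < rx:
--         return 2 if rz < ry else 1
--     return 2 if rz < rx else 0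
-- ===== Notes on version B (the rewrite author's own statement) =====
-- stated objective: alternative
-- what changed: Replaces the six max()/min() passes over three projected lists and the allVars.index(min(allVars)) lookup by one fold over the vertices maintaining three running minima and maxima, followed by a direct first-minimum comparison chain.
import Mathlib
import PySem

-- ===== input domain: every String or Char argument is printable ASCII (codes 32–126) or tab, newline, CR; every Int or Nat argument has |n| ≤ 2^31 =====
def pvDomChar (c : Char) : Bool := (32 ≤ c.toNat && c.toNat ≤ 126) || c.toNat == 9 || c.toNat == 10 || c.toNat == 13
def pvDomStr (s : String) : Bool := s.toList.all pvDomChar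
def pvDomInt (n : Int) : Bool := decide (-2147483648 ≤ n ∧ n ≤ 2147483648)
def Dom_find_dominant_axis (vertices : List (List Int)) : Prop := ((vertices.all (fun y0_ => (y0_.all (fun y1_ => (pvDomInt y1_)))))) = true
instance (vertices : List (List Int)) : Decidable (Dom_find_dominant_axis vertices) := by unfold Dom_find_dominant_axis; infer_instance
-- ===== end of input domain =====

-- B replaces A's seven list passes (three projections, six max/min calls, index-of-min) by a
-- single fold with running per-axis minima/maxima and a direct comparison chain (objective: alternative).

-- ===== PORT A =====
-- x[k] is in range for every admitted input (Pre_); .getD 0 is never the value used there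
def pvGet (v : List Int) (k : Int) : Int := (PySem.List.pyGet? v k).getD 0

def find_dominant_axis (vertices : List (List Int)) : Int :=
  let xArray := vertices.map (fun x => pvGet x 0)
  let yArray := vertices.map (fun x => pvGet x 1)
  let zArray := vertices.map (fun x => pvGet x 2)
  let xVariance := (PySem.List.max? xArray (fun y => y)).getD 0 - (PySem.List.min? xArray (fun y => y)).getD 0
  let yVariance := (PySem.List.max? yArray (fun y => y)).getD 0 - (PySem.List.min? yArray (fun y => y)).getD 0
  let zVariance := (PySem.List.max? zArray (fun y => y)).getD 0 - (PySem.List.min? zArray (fun y => y)).getD 0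
  let allVars := [xVariance, yVariance, zVariance]
  ((PySem.List.index? allVars ((PySem.List.min? allVars (fun y => y)).getD 0)).getD 0 : Nat)

-- ===== PORT B =====
def pvStep (s : Int × Int × Int × Int × Int × Int) (v : List Int) : Int × Int × Int × Int × Int × Int :=
  (min s.1 (pvGet v 0), min s.2.1 (pvGet v 1), min s.2.2.1 (pvGet v 2),
   max s.2.2.2.1 (pvGet v 0), max s.2.2.2.2.1 (pvGet v 1), max s.2.2.2.2.2 (pvGet v 2))

def find_dominant_axis_alt (vertices : List (List Int)) : Int :=
  match vertices with
  | [] => 0   -- unreachable under Pre_: Python B raises IndexError on []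
  | v0 :: rest =>
    let a := pvGet v0 0
    let b := pvGet v0 1
    let c := pvGet v0 2
    let s := rest.foldl pvStep (a, b, c, a, b, c)
    let rx := s.2.2.2.1 - s.1
    let ry := s.2.2.2.2.1 - s.2.1
    let rz := s.2.2.2.2.2 - s.2.2.1
    if ry < rx then (if rz < ry then 2 else 1)
    else (if rz < rx then 2 else 0)

-- ===== PRECONDITION & SPEC =====
-- Pre_ excludes exactly the inputs where Python A raises: the empty list (ValueError from max([]))
-- and vertices shorter than 3 (IndexError from x[1]/x[2]).
def Pre_find_dominant_axis (vertices : List (List Int)) : Prop :=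
  vertices ≠ [] ∧ ∀ v ∈ vertices, 3 ≤ v.length
instance (vertices : List (List Int)) : Decidable (Pre_find_dominant_axis vertices) := by
  unfold Pre_find_dominant_axis; infer_instance

def pvWitness_find_dominant_axis : List (List Int) := [[0, 1, 2], [3, 1, 4]]

def Spec_find_dominant_axis (vertices : List (List Int)) (out : Int) : Prop := out = find_dominant_axis_alt vertices
instance (vertices : List (List Int)) (out : Int) : Decidable (Spec_find_dominant_axis vertices out) := by unfold Spec_find_dominant_axis; infer_instance

-- ===== CLAIM (what is proved, stated in full; the proofs are below) =====
def Claim_equal_find_dominant_axis : Prop := ∀ (vertices : List (List Int)), Dom_find_dominant_axis vertices → Pre_find_dominant_axis vertices → Spec_find_dominant_axis vertices (find_dominant_axis vertices)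

-- ===== LEMMAS AND PROOFS =====

-- B's six-component fold is the tuple of six independent running folds
lemma pvStep_foldl (rest : List (List Int)) (a b c d e f : Int) :
    rest.foldl pvStep (a, b, c, d, e, f) =
      (rest.foldl (fun x w => min x (pvGet w 0)) a,
       rest.foldl (fun x w => min x (pvGet w 1)) b,
       rest.foldl (fun x w => min x (pvGet w 2)) c,
       rest.foldl (fun x w => max x (pvGet w 0)) d,
       rest.foldl (fun x w => max x (pvGet w 1)) e,
       rest.foldl (fun x w => max x (pvGet w 2)) f) := by
  induction rest generalizing a b c d e f with
  | nil => rfl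
  | cons h t ih => simp [List.foldl_cons, pvStep, ih]

-- A's index-of-min over the three-element list is B's comparison chain
lemma pvFinal (rx ry rz : Int) :
    ((PySem.List.index? [rx, ry, rz] (List.foldl min rx [ry, rz])).getD 0 : Nat) =
      (if ry < rx then (if rz < ry then (2 : Int) else 1)
       else (if rz < rx then 2 else 0)) := by
  have hidx : ∀ v : Int, PySem.List.index? [rx, ry, rz] v =
      if rx = v then some 0 else if ry = v then some 1 else if rz = v then some 2 else none := by
    intro v
    by_cases h0 : rx = v
    · subst h0; rw [PySem.List.index?_cons_self]; simp
    · rw [PySem.List.index?_cons_of_ne _ h0]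
      by_cases h1 : ry = v
      · subst h1; rw [PySem.List.index?_cons_self]; simp [h0]
      · rw [PySem.List.index?_cons_of_ne _ h1]
        by_cases h2 : rz = v
        · subst h2; rw [PySem.List.index?_cons_self]; simp [h0, h1]
        · rw [PySem.List.index?_cons_of_ne _ h2]
          simp [h0, h1, h2, PySem.List.index?]
  simp only [List.foldl_cons, List.foldl_nil, hidx, min_def]
  split_ifs <;> simp_all <;> omega

-- ===== VERDICT (by name: the statement is the Claim_ definition above) =====
theorem find_dominant_axis_spec : Claim_equal_find_dominant_axis := by
  intro vertices _ hpre
  unfold Spec_find_dominant_axis find_dominant_axis find_dominant_axis_alt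
  obtain ⟨hne, -⟩ := hpre
  match vertices, hne with
  | v0 :: rest, _ =>
    simp only [List.map_cons, PySem.List.max?_id_cons, PySem.List.min?_id_cons,
      Option.getD_some, List.foldl_map, pvStep_foldl]
    exact pvFinal _ _ _
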